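-- pv_equiv track=rewrite | github.com/Raza-Hashim/DSA_Project | Hum-Kis-Gali-Jarahe-Hain/graphhelperfunctions.py | NearestNeighbour
-- ===== SOURCE A (Python) =====
-- def NearestNeighbour(G,node):
--     index = []
--     weight = []
--     for p in G[node]:
--         index.append(p[0])
--         weight.append(p[1])
--     p = weight.index(min(weight))
--     return index[p]
-- ===== SOURCE B (Python) =====
-- def NearestNeighbour(G, node):
--     return sorted(G[node], key=lambda p: p[1])[0][0]
-- ===== Notes on version B (the rewrite author's own statement) =====
-- stated objective: alternative
-- what changed: Replaces the parallel index/weight list build plus min() plus weight.index() with a stable sort of G[node] by weight followed by taking the first sorted pair; stability of Python's sort preserves the first-tie winner.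
import Mathlib
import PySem

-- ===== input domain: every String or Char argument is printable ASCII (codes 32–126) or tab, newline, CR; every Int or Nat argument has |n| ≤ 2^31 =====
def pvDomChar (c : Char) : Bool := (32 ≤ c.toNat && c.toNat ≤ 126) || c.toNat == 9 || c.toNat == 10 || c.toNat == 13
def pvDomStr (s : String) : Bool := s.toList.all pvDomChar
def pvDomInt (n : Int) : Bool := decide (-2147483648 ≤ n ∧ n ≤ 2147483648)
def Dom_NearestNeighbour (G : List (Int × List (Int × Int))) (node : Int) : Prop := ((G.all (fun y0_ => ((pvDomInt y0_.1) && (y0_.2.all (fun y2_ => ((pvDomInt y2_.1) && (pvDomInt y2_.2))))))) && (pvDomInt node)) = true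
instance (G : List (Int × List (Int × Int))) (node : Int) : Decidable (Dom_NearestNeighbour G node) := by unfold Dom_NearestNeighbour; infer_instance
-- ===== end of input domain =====

-- B replaces A's parallel-list build + min() + .index() by a stable sort on the
-- weight and taking the first sorted pair (sort-then-select); equivalence is
-- about the return value only.

-- ===== PORT A =====
-- index = []; weight = []; for p in G[node]: append p[0]/p[1];
-- p = weight.index(min(weight)); return index[p]
def NearestNeighbour (G : List (Int × List (Int × Int))) (node : Int) : Int :=
  let adj := ((PySem.Dict.ofList G).get? node).getD []   -- G[node]; Pre_ guarantees the key exists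
  let iw := adj.foldl (fun (st : List Int × List Int) p => (st.1 ++ [p.1], st.2 ++ [p.2])) ([], [])
  let m := (PySem.List.min? iw.2 (fun x => x)).getD 0    -- min(weight); Pre_ guarantees nonempty
  let p := (PySem.List.index? iw.2 m).getD 0             -- weight.index(min(weight))
  iw.1.getD p 0                                          -- index[p]

-- ===== PORT B =====
-- return sorted(G[node], key=lambda p: p[1])[0][0]
def NearestNeighbour_alt (G : List (Int × List (Int × Int))) (node : Int) : Int :=
  ((PySem.List.sorted (((PySem.Dict.ofList G).get? node).getD []) (fun p => p.2)).headD (0, 0)).1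

-- ===== PRECONDITION & SPEC =====
-- Pre_ excludes exactly the inputs where Python A raises: node not a key of G (KeyError)
-- or an empty adjacency list (ValueError from min([])); B raises there too (IndexError).
def Pre_NearestNeighbour (G : List (Int × List (Int × Int))) (node : Int) : Prop :=
  ((PySem.Dict.ofList G).get? node).getD [] ≠ []
instance (G : List (Int × List (Int × Int))) (node : Int) : Decidable (Pre_NearestNeighbour G node) := by unfold Pre_NearestNeighbour; infer_instance

def pvWitness_NearestNeighbour : (List (Int × List (Int × Int))) × Int :=
  ([(0, [(5, 3), (6, 1), (7, 1)])], 0)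

def Spec_NearestNeighbour (G : List (Int × List (Int × Int))) (node : Int) (out : Int) : Prop := out = NearestNeighbour_alt G node
instance (G : List (Int × List (Int × Int))) (node : Int) (out : Int) : Decidable (Spec_NearestNeighbour G node out) := by unfold Spec_NearestNeighbour; infer_instance

-- ===== CLAIM (what is proved, stated in full; the proofs are below) =====
def Claim_equal_NearestNeighbour : Prop := ∀ (G : List (Int × List (Int × Int))) (node : Int), Dom_NearestNeighbour G node → Pre_NearestNeighbour G node → Spec_NearestNeighbour G node (NearestNeighbour G node)

-- ===== LEMMAS AND PROOFS =====

-- running "first pair of minimal weight" step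
def pvStep (m p : Int × Int) : Int × Int := if p.2 < m.2 then p else m

-- A's accumulation loop builds the two projection lists
theorem pv_fold_pair (l : List (Int × Int)) (a b : List Int) :
    l.foldl (fun (st : List Int × List Int) p => (st.1 ++ [p.1], st.2 ++ [p.2])) (a, b)
      = (a ++ l.map Prod.fst, b ++ l.map Prod.snd) := by
  induction l generalizing a b with
  | nil => simp
  | cons x t ih => simp [List.foldl, ih]

-- the first-min fold picks the FIRST pair of minimal weight: there is a decomposition
-- pre ++ r :: suf with r strictly below every weight in pre and ≤ every weight overall
theorem pv_fold_first_min (t : List (Int × Int)) (x : Int × Int) :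
    ∃ pre suf, x :: t = pre ++ (t.foldl pvStep x) :: suf ∧
      (∀ y ∈ pre, (t.foldl pvStep x).2 < y.2) ∧
      (∀ y ∈ x :: t, (t.foldl pvStep x).2 ≤ y.2) := by
  induction t generalizing x with
  | nil => exact ⟨[], [], by simp, by simp, by simp⟩
  | cons y s ih =>
    simp only [List.foldl]
    by_cases h : y.2 < x.2
    · simp only [pvStep, if_pos h]
      obtain ⟨pre, suf, hdec, hpre, hall⟩ := ih y
      refine ⟨x :: pre, suf, by simp [hdec], ?_, ?_⟩
      · intro z hz
        rcases List.mem_cons.mp hz with rfl | hz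
        · exact lt_of_le_of_lt (hall y (by simp)) h
        · exact hpre z hz
      · intro z hz
        rcases List.mem_cons.mp hz with rfl | hz
        · exact le_of_lt (lt_of_le_of_lt (hall y (by simp)) h)
        · exact hall z hz
    · simp only [pvStep, if_neg h]
      obtain ⟨pre, suf, hdec, hpre, hall⟩ := ih x
      set r := s.foldl pvStep x with hr
      cases pre with
      | nil =>
        simp only [List.nil_append] at hdec
        injection hdec with h1 h2
        refine ⟨[], y :: s, ?_, by simp, ?_⟩
        · rw [← h1]; rfl
        · intro z hz
          rcases List.mem_cons.mp hz with rfl | hz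
          · rw [← h1]
          · rcases List.mem_cons.mp hz with rfl | hz
            · rw [← h1]; omega
            · exact hall z (by simp [hz])
      | cons p pre' =>
        rw [List.cons_append] at hdec
        injection hdec with h1 h2
        subst h1
        have hrx : r.2 < x.2 := hpre x (by simp)
        refine ⟨x :: y :: pre', suf, by rw [h2]; simp, ?_, ?_⟩
        · intro z hz
          rcases List.mem_cons.mp hz with rfl | hz
          · exact hrx
          · rcases List.mem_cons.mp hz with rfl | hz
            · omega
            · exact hpre z (by simp [hz])
        · intro z hz
          rcases List.mem_cons.mp hz with rfl | hz
          · exact le_of_lt hrx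
          · rcases List.mem_cons.mp hz with rfl | hz
            · omega
            · exact hall z (by simp [hz])

-- min(weight) (the unkeyed running min) equals the weight of the pair the first-min fold picks
theorem pv_foldl_min_eq (t : List (Int × Int)) (x : Int × Int) :
    (t.map Prod.snd).foldl min x.2 = (t.foldl pvStep x).2 := by
  obtain ⟨pre, suf, hdec, _, hall⟩ := pv_fold_first_min t x
  have hle1 : ∀ w ∈ (t.map Prod.snd), (t.foldl pvStep x).2 ≤ w := by
    intro w hw
    obtain ⟨z, hz, rfl⟩ := List.mem_map.mp hw
    exact hall z (by simp [hz])
  have h1 := PySem.List.foldl_min_le (t.map Prod.snd) x.2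
  have h2 := PySem.List.foldl_min_mem (t.map Prod.snd) x.2
  have hmem : (t.foldl pvStep x).2 ∈ (x :: t).map Prod.snd :=
    List.mem_map_of_mem (by rw [hdec]; exact List.mem_append_right _ (by simp))
  have hlex : (t.foldl pvStep x).2 ≤ x.2 := hall x (by simp)
  rcases h2 with h2 | h2
  · have : x.2 ≤ (t.foldl pvStep x).2 := by
      rcases List.mem_map.mp hmem with ⟨z, hz, hz2⟩
      rcases List.mem_cons.mp hz with rfl | hz
      · omega
      · have := h1.2 z.2 (List.mem_map_of_mem hz); omega
    omega
  · have hcb := hle1 _ h2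
    rcases List.mem_map.mp hmem with ⟨z, hz, hz2⟩
    rcases List.mem_cons.mp hz with rfl | hz
    · omega
    · have := h1.2 z.2 (List.mem_map_of_mem hz); omega

-- A's body returns the first component of the first pair of minimal weight
theorem pv_main_A (x : Int × Int) (t : List (Int × Int)) :
    (let iw := (x :: t).foldl (fun (st : List Int × List Int) p => (st.1 ++ [p.1], st.2 ++ [p.2])) ([], [])
     let m := (PySem.List.min? iw.2 (fun x => x)).getD 0
     let p := (PySem.List.index? iw.2 m).getD 0
     iw.1.getD p 0)
      = (t.foldl pvStep x).1 := by
  obtain ⟨pre, suf, hdec, hpre, _⟩ := pv_fold_first_min t x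
  set r := t.foldl pvStep x with hr
  rw [pv_fold_pair]
  simp only [List.nil_append, List.map_cons]
  rw [PySem.List.min?_id_cons, Option.getD_some, pv_foldl_min_eq]
  have hnot : r.2 ∉ pre.map Prod.snd := by
    intro h
    obtain ⟨z, hz, hz2⟩ := List.mem_map.mp h
    have := hpre z hz; omega
  have hidx : PySem.List.index? ((x :: t).map Prod.snd) r.2 = some pre.length := by
    rw [hdec]
    simp only [List.map_append, List.map_cons]
    rw [PySem.List.index?_eq_some_iff]
    exact ⟨pre.map Prod.snd, suf.map Prod.snd, rfl, by simp, hnot⟩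
  simp only [List.map_cons] at hidx
  rw [← hr] at *
  rw [hidx, Option.getD_some]
  have hmapf : (x :: t).map Prod.fst = pre.map Prod.fst ++ r.1 :: suf.map Prod.fst := by
    rw [hdec]; simp
  have hfin : ((x :: t).map Prod.fst).getD pre.length 0 = r.1 := by
    rw [hmapf, List.getD_eq_getElem?_getD, List.getElem?_append_right (by simp)]
    simp
  simpa using hfin

-- B's side: the head of the stable insertion-sort fold is the first pair of minimal weight
theorem pv_fold_insert_head (l : List (Int × Int)) (y : Int × Int) (ys : List (Int × Int)) :
    ∃ zs, l.foldl (fun acc x => PySem.List.insertBy (fun a b => decide (a.2 < b.2)) x acc) (y :: ys)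
      = (l.foldl pvStep y) :: zs := by
  induction l generalizing y ys with
  | nil => exact ⟨ys, rfl⟩
  | cons x t ih =>
    simp only [List.foldl]
    by_cases h : x.2 < y.2
    · have hins : PySem.List.insertBy (fun a b : Int × Int => decide (a.2 < b.2)) x (y :: ys)
          = x :: y :: ys := by simp [PySem.List.insertBy, h]
      rw [hins]
      simpa [pvStep, h] using ih x (y :: ys)
    · have hins : PySem.List.insertBy (fun a b : Int × Int => decide (a.2 < b.2)) x (y :: ys)
          = y :: PySem.List.insertBy (fun a b : Int × Int => decide (a.2 < b.2)) x ys := by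
        simp [PySem.List.insertBy, h]
      rw [hins]
      simpa [pvStep, h] using ih y _

theorem pv_main_B (x : Int × Int) (t : List (Int × Int)) :
    ((PySem.List.sorted (x :: t) (fun p => p.2)).headD (0, 0)).1 = (t.foldl pvStep x).1 := by
  rw [PySem.List.sorted_eq_foldl_insertBy]
  simp only [List.foldl]
  have hbase : PySem.List.insertBy (fun a b : Int × Int => decide (a.2 < b.2)) x [] = [x] := by
    simp [PySem.List.insertBy]
  rw [hbase]
  obtain ⟨zs, hzs⟩ := pv_fold_insert_head t x []
  rw [hzs]
  rfl

-- ===== VERDICT (by name: the statement is the Claim_ definition above) =====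
theorem NearestNeighbour_spec : Claim_equal_NearestNeighbour := by
  intro G node _ hpre
  unfold Spec_NearestNeighbour NearestNeighbour NearestNeighbour_alt
  unfold Pre_NearestNeighbour at hpre
  cases hadj : ((PySem.Dict.ofList G).get? node).getD [] with
  | nil => exact absurd hadj hpre
  | cons x t => exact (pv_main_A x t).trans (pv_main_B x t).symm
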